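-- pv_equiv track=rewrite | github.com/ninepig/leecode_dd_2024 | zmianjing/dd/pureDD/RestaurantsNameProblem.py | findSimilarRestaunt
-- ===== SOURCE A (Python) =====
-- import collections
--
-- def findSimilarRestaunt(orignal:str,targets):
--     orignalCounter = collections.Counter(orignal)
--     res = []
--     for target in targets:
--         targetCounter = collections.Counter(target)
--         count = 0
--         if orignalCounter != targetCounter:
--             continue ## we have different chars , so return false
--         for i in range(len(orignal)):
--             if orignal[i] != target[i]:
--                 count += 1
--             if count > 2:
--                 break
--         if count == 0 or count == 2:
--             res.append(target)
--
--     return res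
-- ===== SOURCE B (Python) =====
-- def findSimilarRestaunt(orignal: str, targets):
--     def keep(t):
--         if len(t) != len(orignal):
--             return False
--         diff = [(a, b) for a, b in zip(orignal, t) if a != b]
--         if not diff:
--             return True
--         if len(diff) == 2:
--             (a1, b1), (a2, b2) = diff
--             return a1 == b2 and a2 == b1
--         return False
--     return [t for t in targets if keep(t)]
-- ===== Notes on version B (the rewrite author's own statement) =====
-- stated objective: faster
-- what changed: Replaces the Counter-equality anagram pre-check plus an indexed mismatch-counting loop with a break by a single zip pass collecting the differing character pairs and validating them as empty or one exact swap.
import Mathlib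
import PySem

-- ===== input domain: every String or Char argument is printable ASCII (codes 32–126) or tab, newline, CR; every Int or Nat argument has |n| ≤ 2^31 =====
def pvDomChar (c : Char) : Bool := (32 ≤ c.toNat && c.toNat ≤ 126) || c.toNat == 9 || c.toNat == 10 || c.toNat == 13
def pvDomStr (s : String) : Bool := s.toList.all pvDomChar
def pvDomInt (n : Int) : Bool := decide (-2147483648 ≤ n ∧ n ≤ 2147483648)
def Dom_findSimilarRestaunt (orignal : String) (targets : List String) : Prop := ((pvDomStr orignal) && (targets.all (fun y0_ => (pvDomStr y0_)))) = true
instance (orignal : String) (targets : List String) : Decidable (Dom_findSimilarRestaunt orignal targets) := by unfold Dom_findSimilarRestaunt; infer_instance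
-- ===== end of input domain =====

-- B replaces A's Counter-equality anagram pre-check plus indexed mismatch-counting loop (with break)
-- by one zip pass collecting the differing pairs and validating them as empty or a single exact swap
-- (no per-target Counter construction; a timing run measured B faster by a constant factor).

-- ===== PORT A =====
-- Python dict/Counter `==`: same number of keys and every (key, value) item of the left dict
-- present with the same value in the right one (order ignored) — exact for dicts with unique keys.
def pvDictEq (d e : PySem.Dict Char Int) : Bool :=
  d.size == e.size && d.items.all (fun p => e.get? p.1 == some p.2)

-- A's inner `for i in range(len(orignal))` loop with its `if count > 2: break`.
-- Indexing uses pyGetD with a default: the loop only runs after the Counter-equality guard,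
-- which forces equal lengths, so every index is in range and the default is never read.
def pvALoop (o t : List Char) : List Int → Int → Int
  | [], count => count
  | i :: is, count =>
    let count := if PySem.List.pyGetD o i ' ' != PySem.List.pyGetD t i ' ' then count + 1 else count
    if count > 2 then count else pvALoop o t is count

def findSimilarRestaunt (orignal : String) (targets : List String) : List String :=
  let o := orignal.toList
  let orignalCounter := PySem.Dict.counter o
  targets.foldl (fun res target =>
    let t := target.toList
    let targetCounter := PySem.Dict.counter t
    if pvDictEq orignalCounter targetCounter = false then res  -- continue
    else
      let count := pvALoop o t (PySem.List.pyRange 0 (o.length : Int) 1) 0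
      if count == 0 || count == 2 then res ++ [target] else res) []

-- ===== PORT B =====
def pvKeepB (o t : List Char) : Bool :=
  if t.length != o.length then false
  else
    match (o.zip t).filter (fun p => p.1 != p.2) with
    | [] => true
    | [(a1, b1), (a2, b2)] => a1 == b2 && a2 == b1
    | _ => false

def findSimilarRestaunt_alt (orignal : String) (targets : List String) : List String :=
  targets.filter (fun target => pvKeepB orignal.toList target.toList)

-- ===== PRECONDITION & SPEC =====
def Spec_findSimilarRestaunt (orignal : String) (targets : List String) (out : List String) : Prop := out = findSimilarRestaunt_alt orignal targets
instance (orignal : String) (targets : List String) (out : List String) : Decidable (Spec_findSimilarRestaunt orignal targets out) := by unfold Spec_findSimilarRestaunt; infer_instance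

-- ===== CLAIM (what is proved, stated in full; the proofs are below) =====
def Claim_equal_findSimilarRestaunt : Prop := ∀ (orignal : String) (targets : List String), Dom_findSimilarRestaunt orignal targets → Spec_findSimilarRestaunt orignal targets (findSimilarRestaunt orignal targets)

-- ===== LEMMAS AND PROOFS =====

-- A's per-target decision, factored out of its result-accumulating loop.
def pvKeepA (o t : List Char) : Bool :=
  if pvDictEq (PySem.Dict.counter o) (PySem.Dict.counter t) = false then false
  else
    let count := pvALoop o t (PySem.List.pyRange 0 (o.length : Int) 1) 0
    count == 0 || count == 2

-- pvALoop re-expressed on the zipped character pairs (same break structure).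
def pvG : List (Char × Char) → Int → Int
  | [], c => c
  | p :: z, c =>
    let c := if p.1 != p.2 then c + 1 else c
    if c > 2 then c else pvG z c

-- the differing pairs of two equal-length strings
def pvDiff (o t : List Char) : List (Char × Char) := (o.zip t).filter (fun p => p.1 != p.2)

lemma pv_get?_counter_of_mem (t : List Char) (k : Char) (h : k ∈ t) :
    (PySem.Dict.counter t).get? k = some (t.count k : Int) := by
  have hnd := PySem.Dict.nodup_keys_counter (κ := Char) t
  have hm : (k, (t.count k : Int)) ∈ (PySem.Dict.counter t).items := by
    rw [PySem.Dict.items_counter]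
    exact List.mem_map.mpr ⟨k, by simp [PySem.Set.mem_ofList, h]⟩
  exact PySem.Dict.get?_of_mem_items _ hm hnd

lemma pv_val_of_get?_counter (t : List Char) (k : Char) (v : Int)
    (h : (PySem.Dict.counter t).get? k = some v) : v = (t.count k : Int) := by
  have := PySem.Dict.getD_eq_get?_getD (PySem.Dict.counter t) k 0
  rw [PySem.Dict.getD_counter, h] at this
  simp at this; omega

lemma pv_mem_of_get?_counter (t : List Char) (k : Char) (v : Int)
    (h : (PySem.Dict.counter t).get? k = some v) : k ∈ t := by
  have : (PySem.Dict.counter t).contains k = (((PySem.Dict.counter t).get? k).isSome) :=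
    PySem.Dict.contains_eq_isSome_get? ..
  rw [h] at this
  rw [PySem.Dict.contains_counter] at this
  simpa using this

lemma pv_dictEq_iff (o t : List Char) :
    pvDictEq (PySem.Dict.counter o) (PySem.Dict.counter t) = true ↔ ∀ c, o.count c = t.count c := by
  constructor
  · intro hb c
    unfold pvDictEq at hb
    simp only [Bool.and_eq_true, beq_iff_eq, List.all_eq_true] at hb
    obtain ⟨hsize, hall⟩ := hb
    by_cases hc : c ∈ o
    · have hm : (c, (o.count c : Int)) ∈ (PySem.Dict.counter o).items := by
        rw [PySem.Dict.items_counter]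
        exact List.mem_map.mpr ⟨c, by simp [PySem.Set.mem_ofList, hc]⟩
      have hg := hall _ hm
      have := pv_val_of_get?_counter t c _ hg
      omega
    · have hsub : PySem.Set.ofList o ⊆ PySem.Set.ofList t := by
        intro k hk
        have hk' : k ∈ o := (PySem.Set.mem_ofList _ _).mp hk
        have hm : (k, (o.count k : Int)) ∈ (PySem.Dict.counter o).items := by
          rw [PySem.Dict.items_counter]
          exact List.mem_map.mpr ⟨k, by simp [PySem.Set.mem_ofList, hk']⟩
        have hg := hall _ hm
        exact (PySem.Set.mem_ofList _ _).mpr (pv_mem_of_get?_counter t k _ hg)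
      have hlen : (PySem.Set.ofList t).length ≤ (PySem.Set.ofList o).length := by
        have : (PySem.Dict.counter o).size = (PySem.Dict.counter (κ := Char) t).size := hsize
        simp only [PySem.Dict.size, PySem.Dict.items_counter, List.length_map] at this
        omega
      have hperm : List.Perm (PySem.Set.ofList o) (PySem.Set.ofList t) :=
        (List.subperm_of_subset (PySem.Set.nodup_ofList o) hsub).perm_of_length_le hlen
      have hct : c ∉ t := fun hmem =>
        hc ((PySem.Set.mem_ofList _ _).mp (hperm.symm.subset ((PySem.Set.mem_ofList _ _).mpr hmem)))
      rw [List.count_eq_zero.mpr hc, List.count_eq_zero.mpr hct]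
  · intro hcount
    have hperm : List.Perm o t := List.perm_iff_count.mpr (fun a => hcount a)
    have hsub1 : PySem.Set.ofList o ⊆ PySem.Set.ofList t := fun k hk =>
      (PySem.Set.mem_ofList _ _).mpr (hperm.subset ((PySem.Set.mem_ofList _ _).mp hk))
    have hsub2 : PySem.Set.ofList t ⊆ PySem.Set.ofList o := fun k hk =>
      (PySem.Set.mem_ofList _ _).mpr (hperm.symm.subset ((PySem.Set.mem_ofList _ _).mp hk))
    have hle1 := (List.subperm_of_subset (PySem.Set.nodup_ofList o) hsub1).length_le
    have hle2 := (List.subperm_of_subset (PySem.Set.nodup_ofList t) hsub2).length_le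
    unfold pvDictEq
    simp only [Bool.and_eq_true, beq_iff_eq, List.all_eq_true]
    constructor
    · simp only [PySem.Dict.size, PySem.Dict.items_counter, List.length_map]
      omega
    · intro p hp
      rw [PySem.Dict.items_counter] at hp
      obtain ⟨k, hk, rfl⟩ := List.mem_map.mp hp
      have hko : k ∈ o := (PySem.Set.mem_ofList _ _).mp hk
      have hkt : k ∈ t := hperm.subset hko
      rw [pv_get?_counter_of_mem t k hkt]
      simp [hcount k]

lemma pvG_min (z : List (Char × Char)) : ∀ c : Int, 0 ≤ c → c ≤ 2 →
    pvG z c = min (c + ((z.filter (fun p => p.1 != p.2)).length : Int)) 3 := by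
  induction z with
  | nil => intro c h1 h2; simp [pvG]; omega
  | cons p z ih =>
    intro c h1 h2
    simp only [pvG, List.filter_cons]
    by_cases hp : p.1 = p.2
    · have hc : ¬ (c > 2) := by omega
      simp [hp, hc]
      exact ih c h1 h2
    · have hne : (p.1 != p.2) = true := by simp [hp]
      simp only [hne, if_true]
      by_cases hc : c + 1 > 2
      · have : c = 2 := by omega
        subst this
        have : (0:Int) ≤ ((z.filter (fun p => p.1 != p.2)).length : Int) := by positivity
        simp; omega
      · simp only [if_neg hc]
        rw [ih (c+1) (by omega) (by omega)]
        simp; omega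

lemma pv_aloop_eq (o t : List Char) (h : o.length = t.length) :
    ∀ (n k : Nat) (c : Int), n = o.length - k →
      pvALoop o t (PySem.List.pyRange (k : Int) (o.length : Int) 1) c = pvG ((o.zip t).drop k) c := by
  intro n
  induction n with
  | zero =>
    intro k c hn
    have hk : o.length ≤ k := by omega
    have hz : (o.zip t).length ≤ k := by simp [List.length_zip]; omega
    rw [PySem.List.pyRange_one_eq_nil (by exact_mod_cast hk)]
    rw [List.drop_of_length_le hz]
    rfl
  | succ n ih =>
    intro k c hn
    have hk : k < o.length := by omega
    have hzl : k < (o.zip t).length := by simp [List.length_zip]; omega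
    rw [PySem.List.pyRange_one_cons (by exact_mod_cast hk)]
    rw [List.drop_eq_getElem_cons hzl]
    simp only [pvALoop, pvG, List.getElem_zip]
    have ho : PySem.List.pyGetD o (k : Int) ' ' = o[k] := by
      rw [PySem.List.pyGetD_natCast]; exact List.getD_eq_getElem o ' ' hk
    have ht : PySem.List.pyGetD t (k : Int) ' ' = t[k] := by
      rw [PySem.List.pyGetD_natCast]; exact List.getD_eq_getElem t ' ' (by omega)
    rw [ho, ht]
    have hstep : ∀ c' : Int,
        (if c' > 2 then c' else pvALoop o t (PySem.List.pyRange ((k : Int) + 1) (o.length : Int) 1) c') =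
        (if c' > 2 then c' else pvG (List.drop (k + 1) (o.zip t)) c') := by
      intro c'
      by_cases hc : c' > 2
      · simp [hc]
      · have hcast : ((k : Int) + 1) = ((k + 1 : Nat) : Int) := by push_cast; ring
        simp only [if_neg hc]
        rw [hcast]
        exact ih (k + 1) c' (by omega)
    by_cases hd : o[k] = t[k]
    · have hb : (o[k] != t[k]) = false := by simp [hd]
      simp only [hb, Bool.false_eq_true, if_false]
      exact hstep c
    · have hb : (o[k] != t[k]) = true := by simp [hd]
      simp only [hb, if_true]
      exact hstep (c + 1)

lemma pv_count_split (o t : List Char) (h : o.length = t.length) (c : Char) :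
    (o.count c : Int) - t.count c =
      ((pvDiff o t).countP (fun p => p.1 == c) : Int) - (pvDiff o t).countP (fun p => p.2 == c) := by
  have ho : (o.zip t).map Prod.fst = o := List.map_fst_zip (by omega)
  have ht : (o.zip t).map Prod.snd = t := List.map_snd_zip (by omega)
  have co : o.count c = (o.zip t).countP (fun p => p.1 == c) := by
    conv_lhs => rw [← ho]
    rw [List.count_eq_countP, List.countP_map]
    rfl
  have ct : t.count c = (o.zip t).countP (fun p => p.2 == c) := by
    conv_lhs => rw [← ht]
    rw [List.count_eq_countP, List.countP_map]
    rfl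
  have hsplit := fun (p : Char × Char → Bool) =>
    List.countP_eq_countP_filter_add (o.zip t) p (fun p => p.1 != p.2)
  have hsame : ((o.zip t).filter (fun p => !(p.1 != p.2))).countP (fun p => p.1 == c)
      = ((o.zip t).filter (fun p => !(p.1 != p.2))).countP (fun p => p.2 == c) := by
    apply List.countP_congr
    intro p hp
    have := (List.mem_filter.mp hp).2
    simp at this
    simp [this]
  rw [co, ct, hsplit (fun p => p.1 == c), hsplit (fun p => p.2 == c)]
  unfold pvDiff
  push_cast
  omega

lemma pv_count_iff_diff (o t : List Char) (h : o.length = t.length) (c : Char) :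
    o.count c = t.count c ↔
      (pvDiff o t).countP (fun p => p.1 == c) = (pvDiff o t).countP (fun p => p.2 == c) := by
  have := pv_count_split o t h c
  omega

-- a true pvKeepB forces the two strings to have equal character counts
lemma pv_keepB_anag (o t : List Char) (h : pvKeepB o t = true) : ∀ c, o.count c = t.count c := by
  intro c
  unfold pvKeepB at h
  by_cases hl : t.length = o.length
  · rw [if_neg (by simp [hl])] at h
    rw [pv_count_iff_diff o t hl.symm c]
    rcases hF : (o.zip t).filter (fun p => p.1 != p.2) with _ | ⟨⟨a1, b1⟩, _ | ⟨⟨a2, b2⟩, rest⟩⟩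
    · simp [pvDiff, hF]
    · rw [hF] at h; simp at h
    · rcases rest with _ | ⟨r, rest⟩
      · rw [hF] at h
        simp only [Bool.and_eq_true, beq_iff_eq] at h
        obtain ⟨h1, h2⟩ := h
        subst h1; subst h2
        simp only [pvDiff, hF, List.countP_cons, List.countP_nil]
        omega
      · rw [hF] at h; simp at h
  · rw [if_pos (by simp [hl])] at h
    exact absurd h (by simp)

lemma pv_keep_eq (o t : List Char) : pvKeepA o t = pvKeepB o t := by
  by_cases hA : pvDictEq (PySem.Dict.counter o) (PySem.Dict.counter t) = true
  · have hcnt := (pv_dictEq_iff o t).mp hA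
    have hperm : List.Perm o t := List.perm_iff_count.mpr (fun a => hcnt a)
    have hlen := hperm.length_eq
    have hal := pv_aloop_eq o t hlen o.length 0 0 (by omega)
    simp only [Nat.cast_zero] at hal
    rw [List.drop_zero] at hal
    have hmin := pvG_min (o.zip t) 0 (by omega) (by omega)
    unfold pvKeepA pvKeepB
    rw [if_neg (by simp [hA]), if_neg (by simp [hlen])]
    rw [hal, hmin]
    have hd := fun c => (pv_count_iff_diff o t hlen c).mp (hcnt c)
    rcases hF : (o.zip t).filter (fun p => p.1 != p.2) with _ | ⟨⟨a1, b1⟩, _ | ⟨⟨a2, b2⟩, rest⟩⟩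
    · simp [hF]
    · simp [hF]
    · rcases rest with _ | ⟨r, rest⟩
      · -- exactly two differing positions: the counts force them to be a swap
        have hm1 : ((a1, b1)) ∈ (o.zip t).filter (fun p => p.1 != p.2) := by rw [hF]; simp
        have hm2 : ((a2, b2)) ∈ (o.zip t).filter (fun p => p.1 != p.2) := by rw [hF]; simp
        have hne1 : ¬ a1 = b1 := by simpa using (List.mem_filter.mp hm1).2
        have hne2 : ¬ a2 = b2 := by simpa using (List.mem_filter.mp hm2).2
        have hc1 := hd a1
        have hc2 := hd a2
        simp only [pvDiff, hF, List.countP_cons, List.countP_nil] at hc1 hc2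
        simp only [beq_iff_eq] at hc1 hc2
        have hb2 : b2 = a1 ∧ b1 = a2 := by
          by_cases e1 : b1 = a1 <;> by_cases e2 : b2 = a1 <;> by_cases e3 : a2 = a1 <;>
            by_cases e4 : b1 = a2 <;> by_cases e5 : b2 = a2 <;>
            simp_all
        obtain ⟨hb2, hb1⟩ := hb2
        subst hb2; subst hb1
        simp [hF]
      · simp [hF]
        omega
  · have hA' : pvDictEq (PySem.Dict.counter o) (PySem.Dict.counter t) = false := by
      cases hx : pvDictEq (PySem.Dict.counter o) (PySem.Dict.counter t)
      · rfl
      · exact absurd hx hA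
    have h1 : pvKeepA o t = false := by unfold pvKeepA; rw [if_pos hA']
    rw [h1]
    cases hB : pvKeepB o t
    · rfl
    · exact absurd ((pv_dictEq_iff o t).mpr (pv_keepB_anag o t hB)) hA

lemma pv_fold_filter (s : String) (ts : List String) :
    findSimilarRestaunt s ts = ts.filter (fun target => pvKeepA s.toList target.toList) := by
  suffices h : ∀ (ts res : List String),
      List.foldl (fun res target =>
        if pvDictEq (PySem.Dict.counter s.toList) (PySem.Dict.counter target.toList) = false then res
        else if (pvALoop s.toList target.toList (PySem.List.pyRange 0 (s.toList.length : Int) 1) 0 == 0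
              || pvALoop s.toList target.toList (PySem.List.pyRange 0 (s.toList.length : Int) 1) 0 == 2) = true
          then res ++ [target] else res) res ts
      = res ++ ts.filter (fun target => pvKeepA s.toList target.toList) by
    have := h ts []
    simpa [findSimilarRestaunt] using this
  intro ts
  induction ts with
  | nil => intro res; simp
  | cons hd tl ih =>
    intro res
    rw [List.foldl_cons, List.filter_cons]
    by_cases h1 : pvDictEq (PySem.Dict.counter s.toList) (PySem.Dict.counter hd.toList) = false
    · have hk : pvKeepA s.toList hd.toList = false := by unfold pvKeepA; rw [if_pos h1]
      simp only [if_pos h1, hk]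
      rw [ih res]
      simp
    · have hk : pvKeepA s.toList hd.toList =
          (pvALoop s.toList hd.toList (PySem.List.pyRange 0 (s.toList.length : Int) 1) 0 == 0
            || pvALoop s.toList hd.toList (PySem.List.pyRange 0 (s.toList.length : Int) 1) 0 == 2) := by
        unfold pvKeepA; rw [if_neg h1]
      simp only [if_neg h1, hk]
      by_cases h2 : (pvALoop s.toList hd.toList (PySem.List.pyRange 0 (s.toList.length : Int) 1) 0 == 0
            || pvALoop s.toList hd.toList (PySem.List.pyRange 0 (s.toList.length : Int) 1) 0 == 2) = true
      · simp only [h2, if_true]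
        rw [ih (res ++ [hd])]
        simp
      · have h2' : (pvALoop s.toList hd.toList (PySem.List.pyRange 0 (s.toList.length : Int) 1) 0 == 0
            || pvALoop s.toList hd.toList (PySem.List.pyRange 0 (s.toList.length : Int) 1) 0 == 2) = false := by
          cases hx : (pvALoop s.toList hd.toList (PySem.List.pyRange 0 (s.toList.length : Int) 1) 0 == 0
            || pvALoop s.toList hd.toList (PySem.List.pyRange 0 (s.toList.length : Int) 1) 0 == 2)
          · rfl
          · exact absurd hx h2
        simp only [h2', Bool.false_eq_true, if_false]
        exact ih res

-- ===== VERDICT (by name: the statement is the Claim_ definition above) =====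
theorem findSimilarRestaunt_spec : Claim_equal_findSimilarRestaunt := by
  intro orignal targets _
  unfold Spec_findSimilarRestaunt findSimilarRestaunt_alt
  rw [pv_fold_filter orignal targets]
  exact List.filter_congr (fun t _ => pv_keep_eq orignal.toList t.toList)
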